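-- pv_equiv track=rewrite | github.com/danielromero95/Fit_Control | src/gui/pages/enhanced_dashboard_page.py | _parse_plan_md
-- ===== SOURCE A (Python) =====
-- def _parse_plan_md(plan_md: str) -> dict[str, list[tuple[str, str]]]:
--     """Convierte Markdown en un diccionario de plan semanal."""
--     plan: dict[str, list[tuple[str, str]]] = {}
--     current_day: str | None = None
--     for line in plan_md.splitlines():
--         if line.startswith("### "):
--             current_day = line[4:].strip()
--             plan[current_day] = []
--             continue
--         if current_day is None or not line.strip():
--             continue
--         if line.strip().lower().startswith("descanso"):
--             plan[current_day] = []
--             continue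
--         if line.startswith("- "):
--             text = line[2:].strip()
--             parts = text.rsplit(" ", 1)
--             if len(parts) == 2:
--                 plan[current_day].append((parts[0], parts[1]))
--             else:
--                 plan[current_day].append((text, ""))
--     return plan
-- ===== SOURCE B (Python) =====
-- def _parse_day_lines(lines):
--     out = []
--     for line in lines:
--         stripped = line.strip()
--         if not stripped:
--             continue
--         if stripped.lower().startswith("descanso"):
--             out = []
--             continue
--         if line.startswith("- "):
--             text = line[2:].strip()
--             parts = text.rsplit(" ", 1)
--             if len(parts) == 2:
--                 out.append((parts[0], parts[1]))
--             else:
--                 out.append((text, ""))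
--     return out
--
--
-- def _parse_plan_md(plan_md: str) -> dict[str, list[tuple[str, str]]]:
--     # Pass 1: group the raw lines under their day header; a later duplicate
--     # header resets that day's lines (dict keeps the first position).
--     sections: dict[str, list[str]] = {}
--     day = None
--     for line in plan_md.splitlines():
--         if line.startswith("### "):
--             day = line[4:].strip()
--             sections[day] = []
--         elif day is not None:
--             sections[day].append(line)
--     # Pass 2: parse each day's grouped lines into exercise tuples.
--     return {day: _parse_day_lines(lines) for day, lines in sections.items()}
-- ===== Notes on version B (the rewrite author's own statement) =====
-- stated objective: alternative
-- what changed: A's single interleaved state machine (dict of parsed exercises mutated per line) is split into two passes: first group the raw lines under their day header into an ordered day->raw-lines dict (a duplicate header resets that day's lines), then parse each day's grouped lines independently into exercise tuples.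
import Mathlib
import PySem

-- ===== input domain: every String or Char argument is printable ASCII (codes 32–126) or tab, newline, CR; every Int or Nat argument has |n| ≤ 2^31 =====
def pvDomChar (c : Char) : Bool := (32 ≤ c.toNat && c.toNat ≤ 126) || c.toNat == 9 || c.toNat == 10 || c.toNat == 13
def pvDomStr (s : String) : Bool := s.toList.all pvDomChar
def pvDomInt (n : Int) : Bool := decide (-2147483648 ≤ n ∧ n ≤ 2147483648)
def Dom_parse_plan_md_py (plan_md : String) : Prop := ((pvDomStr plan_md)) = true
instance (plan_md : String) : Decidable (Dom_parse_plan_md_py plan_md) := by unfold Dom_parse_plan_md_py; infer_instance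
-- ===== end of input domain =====

-- B replaces A's interleaved dict-building state machine by two passes: group raw lines under
-- their day header first, then parse each day's lines; objective: alternative decomposition.

-- hand port of text.rsplit(" ", 1) (no PySem primitive): splits at the LAST space; exact:
-- none = no space (Python returns [text]), some (a, b) = [a, b]
def pvRsplitSpace (cs : List Char) : Option (List Char × List Char) :=
  match cs with
  | [] => none
  | c :: rest =>
    match pvRsplitSpace rest with
    | some (a, b) => some (c :: a, b)
    | none => if c = ' ' then some ([], rest) else none

def pvRsplit1 (s : String) : Option (String × String) :=
  (pvRsplitSpace s.toList).map (fun p => (String.ofList p.1, String.ofList p.2))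

-- ===== PORT A =====
def pvStepA (st : PySem.Dict String (List (String × String)) × Option String) (line : String) :
    PySem.Dict String (List (String × String)) × Option String :=
  if PySem.Str.startswith line "### " then
    let d := PySem.Str.strip (PySem.Str.slice line (some 4) none)
    (st.1.insert d [], some d)
  else
    match st.2 with
    | none => st
    | some cur =>
      if PySem.Str.strip line = "" then st
      else if PySem.Str.startswith (PySem.Str.lower (PySem.Str.strip line)) "descanso" then
        (st.1.insert cur [], some cur)
      else if PySem.Str.startswith line "- " then
        let text := PySem.Str.strip (PySem.Str.slice line (some 2) none)
        match pvRsplit1 text with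
        | some (a, b) => (st.1.modify cur [] (· ++ [(a, b)]), some cur)
        | none => (st.1.modify cur [] (· ++ [(text, "")]), some cur)
      else st

def parse_plan_md_py (plan_md : String) : List (String × List (String × String)) :=
  ((PySem.Str.splitlines plan_md).foldl pvStepA (PySem.Dict.empty, none)).1.items

-- ===== PORT B =====
def pvStepBody (acc : List (String × String)) (line : String) : List (String × String) :=
  let stripped := PySem.Str.strip line
  if stripped = "" then acc
  else if PySem.Str.startswith (PySem.Str.lower stripped) "descanso" then []
  else if PySem.Str.startswith line "- " then
    let text := PySem.Str.strip (PySem.Str.slice line (some 2) none)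
    match pvRsplit1 text with
    | some (a, b) => acc ++ [(a, b)]
    | none => acc ++ [(text, "")]
  else acc

def pvParseDayLines (lines : List String) : List (String × String) :=
  lines.foldl pvStepBody []

def pvStepGroup (st : PySem.Dict String (List String) × Option String) (line : String) :
    PySem.Dict String (List String) × Option String :=
  if PySem.Str.startswith line "### " then
    let d := PySem.Str.strip (PySem.Str.slice line (some 4) none)
    (st.1.insert d [], some d)
  else
    match st.2 with
    | none => st
    | some cur => (st.1.modify cur [] (· ++ [line]), some cur)

def parse_plan_md_py_alt (plan_md : String) : List (String × List (String × String)) :=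
  (((PySem.Str.splitlines plan_md).foldl pvStepGroup (PySem.Dict.empty, none)).1.items).map
    (fun p => (p.1, pvParseDayLines p.2))

-- ===== PRECONDITION & SPEC =====
def Spec_parse_plan_md_py (plan_md : String) (out : List (String × List (String × String))) : Prop := out = parse_plan_md_py_alt plan_md
instance (plan_md : String) (out : List (String × List (String × String))) : Decidable (Spec_parse_plan_md_py plan_md out) := by unfold Spec_parse_plan_md_py; infer_instance

-- ===== CLAIM (what is proved, stated in full; the proofs are below) =====
def Claim_equal_parse_plan_md_py : Prop := ∀ (plan_md : String), Dom_parse_plan_md_py plan_md → Spec_parse_plan_md_py plan_md (parse_plan_md_py plan_md)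

-- ===== LEMMAS AND PROOFS =====

-- invariant tying A's running plan to B's running raw-line groups
def pvInv (sA : PySem.Dict String (List (String × String)) × Option String)
    (sB : PySem.Dict String (List String) × Option String) : Prop :=
  sA.2 = sB.2 ∧ sA.1.keys = sB.1.keys ∧ sA.1.keys.Nodup ∧
  (∀ k, sA.1.getD k [] = pvParseDayLines (sB.1.getD k [])) ∧
  (∀ c, sA.2 = some c → sA.1.contains c = true)

theorem pvParse_snoc (b : List String) (l : String) :
    pvParseDayLines (b ++ [l]) = pvStepBody (pvParseDayLines b) l := by
  simp [pvParseDayLines]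

theorem pvStepA_some (sA : PySem.Dict String (List (String × String)) × Option String)
    (cur line : String) (ha : sA.2 = some cur)
    (hh : PySem.Str.startswith line "### " = false) (hcontA : sA.1.contains cur = true) :
    (pvStepA sA line).2 = some cur ∧ (pvStepA sA line).1.keys = sA.1.keys ∧
    ∀ k, (pvStepA sA line).1.getD k [] =
      if k = cur then pvStepBody (sA.1.getD cur []) line else sA.1.getD k [] := by
  have hh' : ¬ (PySem.Str.startswith line "### " = true) := by
    intro hct; rw [hh] at hct; exact Bool.false_ne_true hct
  by_cases h1 : PySem.Str.strip line = ""
  · -- blank line: A leaves its state, B's body-step leaves the accumulator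
    have hE : pvStepA sA line = sA := by
      simp only [pvStepA, ha]; rw [if_neg hh', if_pos h1]
    have hB : ∀ acc, pvStepBody acc line = acc := fun acc => by
      simp only [pvStepBody]; rw [if_pos h1]
    refine ⟨by rw [hE]; exact ha, by rw [hE], fun k => ?_⟩
    rw [hE, hB]
    by_cases hk : k = cur
    · subst hk; simp
    · simp [hk]
  · by_cases h2 : PySem.Str.startswith (PySem.Str.lower (PySem.Str.strip line)) "descanso" = true
    · -- descanso: A resets the day's entry, B's body-step resets the accumulator
      have hE : pvStepA sA line = (sA.1.insert cur [], some cur) := by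
        simp only [pvStepA, ha]; rw [if_neg hh', if_neg h1, if_pos h2]
      have hB : ∀ acc, pvStepBody acc line = [] := fun acc => by
        simp only [pvStepBody]; rw [if_neg h1, if_pos h2]
      rw [hE]
      refine ⟨rfl, PySem.Dict.keys_insert_of_contains _ _ hcontA, fun k => ?_⟩
      rw [hB, PySem.Dict.getD_insert]
    · by_cases h3 : PySem.Str.startswith line "- " = true
      · -- exercise line: A appends the parsed pair, B's body-step appends the same pair
        rcases hm : pvRsplit1 (PySem.Str.strip (PySem.Str.slice line (some 2) none)) with _ | ⟨a, b⟩
        · have hE : pvStepA sA line =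
              (sA.1.modify cur [] (· ++ [(PySem.Str.strip (PySem.Str.slice line (some 2) none), "")]), some cur) := by
            simp only [pvStepA, ha]; rw [if_neg hh', if_neg h1, if_neg h2, if_pos h3, hm]
          have hB : ∀ acc, pvStepBody acc line =
              acc ++ [(PySem.Str.strip (PySem.Str.slice line (some 2) none), "")] := fun acc => by
            simp only [pvStepBody]; rw [if_neg h1, if_neg h2, if_pos h3, hm]
          rw [hE]
          refine ⟨rfl, ?_, fun k => ?_⟩
          · rw [PySem.Dict.keys_modify]
            exact PySem.Dict.keys_insert_of_contains _ _ (by simp [hcontA])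
          · rw [hB, PySem.Dict.getD_modify]
        · have hE : pvStepA sA line = (sA.1.modify cur [] (· ++ [(a, b)]), some cur) := by
            simp only [pvStepA, ha]; rw [if_neg hh', if_neg h1, if_neg h2, if_pos h3, hm]
          have hB : ∀ acc, pvStepBody acc line = acc ++ [(a, b)] := fun acc => by
            simp only [pvStepBody]; rw [if_neg h1, if_neg h2, if_pos h3, hm]
          rw [hE]
          refine ⟨rfl, ?_, fun k => ?_⟩
          · rw [PySem.Dict.keys_modify]
            exact PySem.Dict.keys_insert_of_contains _ _ (by simp [hcontA])
          · rw [hB, PySem.Dict.getD_modify]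
      · -- any other line is ignored by both
        have hE : pvStepA sA line = sA := by
          simp only [pvStepA, ha]; rw [if_neg hh', if_neg h1, if_neg h2, if_neg h3]
        have hB : ∀ acc, pvStepBody acc line = acc := fun acc => by
          simp only [pvStepBody]; rw [if_neg h1, if_neg h2, if_neg h3]
        refine ⟨by rw [hE]; exact ha, by rw [hE], fun k => ?_⟩
        rw [hE, hB]
        by_cases hk : k = cur
        · subst hk; simp
        · simp [hk]

set_option maxHeartbeats 1000000 in
theorem pvStep_inv (sA : PySem.Dict String (List (String × String)) × Option String)
    (sB : PySem.Dict String (List String) × Option String) (line : String)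
    (h : pvInv sA sB) : pvInv (pvStepA sA line) (pvStepGroup sB line) := by
  obtain ⟨hc, hk, hnd, hg, hcont⟩ := h
  by_cases hh : PySem.Str.startswith line "### " = true
  · -- header line: both sides insert the fresh day with an empty value
    have hEA : pvStepA sA line =
        (sA.1.insert (PySem.Str.strip (PySem.Str.slice line (some 4) none)) [],
          some (PySem.Str.strip (PySem.Str.slice line (some 4) none))) := by
      simp only [pvStepA]; rw [if_pos hh]
    have hEB : pvStepGroup sB line =
        (sB.1.insert (PySem.Str.strip (PySem.Str.slice line (some 4) none)) [],
          some (PySem.Str.strip (PySem.Str.slice line (some 4) none))) := by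
      simp only [pvStepGroup]; rw [if_pos hh]
    rw [hEA, hEB]
    have hcd : ∀ x, sA.1.contains x = sB.1.contains x := fun x => by
      rw [PySem.Dict.contains_eq_decide_mem_keys, PySem.Dict.contains_eq_decide_mem_keys, hk]
    refine ⟨rfl, ?_, PySem.Dict.nodup_keys_insert _ _ _ hnd, ?_, ?_⟩
    · cases hcs : sB.1.contains (PySem.Str.strip (PySem.Str.slice line (some 4) none)) with
      | true =>
        rw [PySem.Dict.keys_insert_of_contains _ _ ((hcd _).trans hcs),
            PySem.Dict.keys_insert_of_contains _ _ hcs]; exact hk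
      | false =>
        rw [PySem.Dict.keys_insert_of_not_contains _ _ ((hcd _).trans hcs),
            PySem.Dict.keys_insert_of_not_contains _ _ hcs, hk]
    · intro k
      rw [PySem.Dict.getD_insert, PySem.Dict.getD_insert]
      split
      · simp [pvParseDayLines]
      · exact hg k
    · intro c hcc
      obtain rfl := Option.some.inj hcc
      exact PySem.Dict.contains_insert_self _ _ _
  · -- non-header line
    have hh' : PySem.Str.startswith line "### " = false := by
      rwa [Bool.not_eq_true] at hh
    cases hsb : sB.2 with
    | none =>
      have ha : sA.2 = none := hc.trans hsb
      have hEA : pvStepA sA line = sA := by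
        simp only [pvStepA, ha]; rw [if_neg hh]
      have hEB : pvStepGroup sB line = sB := by
        simp only [pvStepGroup, hsb]; rw [if_neg hh]
      rw [hEA, hEB]
      exact ⟨hc, hk, hnd, hg, hcont⟩
    | some cur =>
      have ha : sA.2 = some cur := hc.trans hsb
      have hcontA : sA.1.contains cur = true := hcont cur ha
      have hcontB : sB.1.contains cur = true := by
        rw [PySem.Dict.contains_eq_decide_mem_keys] at hcontA ⊢
        rwa [hk] at hcontA
      obtain ⟨ha2, hakeys, hagetD⟩ := pvStepA_some sA cur line ha hh' hcontA
      have hEB : pvStepGroup sB line = (sB.1.modify cur [] (· ++ [line]), some cur) := by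
        simp only [pvStepGroup, hsb]; rw [if_neg hh]
      rw [hEB]
      refine ⟨ha2, ?_, ?_, ?_, ?_⟩
      · rw [hakeys, PySem.Dict.keys_modify,
            PySem.Dict.keys_insert_of_contains _ _ (by simp [hcontB])]
        exact hk
      · rwa [hakeys]
      · intro k
        rw [hagetD k, PySem.Dict.getD_modify]
        by_cases hk' : k = cur
        · subst hk'; rw [if_pos rfl, if_pos rfl, pvParse_snoc, hg k]
        · rw [if_neg hk', if_neg hk']; exact hg k
      · intro c hcc
        rw [ha2] at hcc
        cases hcc
        rw [PySem.Dict.contains_eq_decide_mem_keys, hakeys,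
            ← PySem.Dict.contains_eq_decide_mem_keys]
        exact hcontA

theorem pvFold_inv (lines : List String)
    (sA : PySem.Dict String (List (String × String)) × Option String)
    (sB : PySem.Dict String (List String) × Option String) (h : pvInv sA sB) :
    pvInv (lines.foldl pvStepA sA) (lines.foldl pvStepGroup sB) := by
  induction lines generalizing sA sB with
  | nil => exact h
  | cons l rest ih => exact ih _ _ (pvStep_inv _ _ _ h)

-- ===== VERDICT (by name: the statement is the Claim_ definition above) =====
theorem parse_plan_md_py_spec : Claim_equal_parse_plan_md_py := by
  intro plan_md _
  unfold Spec_parse_plan_md_py parse_plan_md_py parse_plan_md_py_alt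
  have h0 : pvInv (PySem.Dict.empty, none) ((PySem.Dict.empty : PySem.Dict String (List String)), none) := by
    refine ⟨rfl, rfl, ?_, ?_, ?_⟩ <;> simp [PySem.Dict.keys_empty, PySem.Dict.getD_empty, pvParseDayLines]
  obtain ⟨hc, hk, hnd, hg, _⟩ := pvFold_inv (PySem.Str.splitlines plan_md) _ _ h0
  rw [PySem.Dict.items_eq_map_keys _ hnd ([] : List (String × String)),
      PySem.Dict.items_eq_map_keys _ (hk ▸ hnd) ([] : List String)]
  simp only [List.map_map, hk]
  exact List.map_congr_left fun k _ => by simp [hg k]
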